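-- pv_equiv track=rewrite | github.com/zhanpoint/dream-log | backend/apps/ai_services/knowledge_base/workflow/_4_data_processor.py | _preserve_structure_intelligent
-- ===== SOURCE A (Python) =====
-- def _preserve_structure_intelligent(text: str) -> str:
--     """智能保留结构"""
--     # 移除多余的空行，但保留Markdown结构
--     lines = text.split('\n')
--     processed_lines = []
--     in_code_block = False
--
--     for line in lines:
--         if line.strip().startswith("```"):
--             in_code_block = not in_code_block
--             processed_lines.append(line)
--             continue
--
--         if not in_code_block and not line.strip():
--             # 如果前一行也是空行，则跳过
--             if processed_lines and not processed_lines[-1].strip():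
--                 continue
--
--         processed_lines.append(line)
--
--     return '\n'.join(processed_lines)
-- ===== SOURCE B (Python) =====
-- def _collapse_blanks(seg):
--     # collapse each maximal run of blank lines to its first line
--     out = []
--     i, n = 0, len(seg)
--     while i < n:
--         out.append(seg[i])
--         if not seg[i].strip():
--             while i < n and not seg[i].strip():
--                 i += 1
--         else:
--             i += 1
--     return out
--
--
-- def _preserve_structure_intelligent(text: str) -> str:
--     lines = text.split('\n')
--     # partition into alternating code / non-code segments
--     segments = []
--     i, n = 0, len(lines)
--     while i < n:
--         is_code = lines[i].strip().startswith("```")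
--         j = i + 1
--         while j < n and not lines[j].strip().startswith("```"):
--             j += 1
--         if is_code and j < n:
--             j += 1  # include the closing fence
--         segments.append((is_code, lines[i:j]))
--         i = j
--     out = []
--     for is_code, seg in segments:
--         out.extend(seg if is_code else _collapse_blanks(seg))
--     return '\n'.join(out)
-- ===== Notes on version B (the rewrite author's own statement) =====
-- stated objective: alternative
-- what changed: B first partitions the lines into alternating code/non-code segments (scanning to each fence), keeps code segments verbatim, and collapses each maximal blank run inside non-code segments to its first line, instead of A's single pass with an in_code_block flag and a look-back at the last kept line.
import Mathlib
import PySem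

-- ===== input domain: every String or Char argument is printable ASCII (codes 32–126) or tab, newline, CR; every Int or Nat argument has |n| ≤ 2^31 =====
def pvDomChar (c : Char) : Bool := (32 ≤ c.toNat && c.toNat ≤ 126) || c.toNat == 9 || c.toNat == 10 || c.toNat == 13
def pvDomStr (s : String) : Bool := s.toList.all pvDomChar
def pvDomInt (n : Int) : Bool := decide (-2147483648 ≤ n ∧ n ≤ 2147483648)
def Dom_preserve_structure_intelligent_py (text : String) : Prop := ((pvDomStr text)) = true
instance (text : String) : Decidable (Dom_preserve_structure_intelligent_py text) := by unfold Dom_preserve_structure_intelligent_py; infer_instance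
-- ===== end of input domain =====

-- B re-implements A by a different decomposition (partition into code / non-code segments, then
-- collapse blank runs per non-code segment) with the same cost; objective: alternative.

-- shared Python expressions: `not line.strip()` and `line.strip().startswith("```")`
def pvBlank (l : String) : Bool := PySem.Str.strip l == ""
def pvFence (l : String) : Bool := PySem.Str.startswith (PySem.Str.strip l) "```"

-- ===== PORT A =====
-- the body of A's for-loop over `lines`, state = (processed_lines, in_code_block)
def pvAStep (st : List String × Bool) (line : String) : List String × Bool :=
  if pvFence line then (st.1 ++ [line], !st.2)
  else if !st.2 && pvBlank line then
    match PySem.List.pyGet? st.1 (-1) with      -- processed_lines[-1] (only read when nonempty)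
    | some p => if pvBlank p then (st.1, st.2) else (st.1 ++ [line], st.2)
    | none => (st.1 ++ [line], st.2)
  else (st.1 ++ [line], st.2)

def preserve_structure_intelligent_py (text : String) : String :=
  -- sep "\n" ≠ "" so split? never returns none
  PySem.Str.join "\n" ((((PySem.Str.split? text "\n").getD []).foldl pvAStep ([], false)).1)

-- ===== PORT B =====
-- scan forward to the closing fence (inclusive); returns (segment body, rest)
def pvTakeCode : List String → List String × List String
  | [] => ([], [])
  | l :: ls => if pvFence l then ([l], ls) else
      let p := pvTakeCode ls; (l :: p.1, p.2)

-- scan forward up to (excluding) the next fence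
def pvTakeText : List String → List String × List String
  | [] => ([], [])
  | l :: ls => if pvFence l then ([], l :: ls) else
      let p := pvTakeText ls; (l :: p.1, p.2)

theorem pvTakeCode_len (ls : List String) : (pvTakeCode ls).2.length ≤ ls.length := by
  induction ls with
  | nil => simp [pvTakeCode]
  | cons l ls ih => simp only [pvTakeCode]; split <;> simp <;> omega

theorem pvTakeText_len (ls : List String) : (pvTakeText ls).2.length ≤ ls.length := by
  induction ls with
  | nil => simp [pvTakeText]
  | cons l ls ih => simp only [pvTakeText]; split <;> simp <;> omega

-- partition the lines into alternating (is_code, segment) pieces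
def pvSegments : List String → List (Bool × List String)
  | [] => []
  | l :: ls =>
    if pvFence l then
      let p := pvTakeCode ls; (true, l :: p.1) :: pvSegments p.2
    else
      let p := pvTakeText ls; (false, l :: p.1) :: pvSegments p.2
termination_by ls => ls.length
decreasing_by
  · have := pvTakeCode_len ls; simpa using Nat.lt_succ_of_le this
  · have := pvTakeText_len ls; simpa using Nat.lt_succ_of_le this

-- collapse each maximal run of blank lines to its first line
def pvCollapse : List String → List String
  | [] => []
  | l :: ls =>
    if pvBlank l then l :: pvCollapse (ls.dropWhile pvBlank)
    else l :: pvCollapse ls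
termination_by ls => ls.length
decreasing_by
  · have := ls.length_dropWhile_le pvBlank; simpa using Nat.lt_succ_of_le this
  · simp

def preserve_structure_intelligent_py_alt (text : String) : String :=
  PySem.Str.join "\n"
    ((pvSegments ((PySem.Str.split? text "\n").getD [])).foldl
      (fun out s => out ++ (if s.1 then s.2 else pvCollapse s.2)) [])

-- ===== PRECONDITION & SPEC =====
def Spec_preserve_structure_intelligent_py (text : String) (out : String) : Prop := out = preserve_structure_intelligent_py_alt text
instance (text : String) (out : String) : Decidable (Spec_preserve_structure_intelligent_py text out) := by unfold Spec_preserve_structure_intelligent_py; infer_instance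

-- ===== CLAIM (what is proved, stated in full; the proofs are below) =====
def Claim_equal_preserve_structure_intelligent_py : Prop := ∀ (text : String), Dom_preserve_structure_intelligent_py text → Spec_preserve_structure_intelligent_py text (preserve_structure_intelligent_py text)

-- ===== LEMMAS AND PROOFS =====

-- a fence line is never blank ("```" is a nonempty prefix of its strip)
theorem pvFence_not_blank (l : String) (h : pvBlank l = true) : pvFence l = false := by
  have hs : PySem.Str.strip l = "" := by
    simpa [pvBlank] using h
  simp [pvFence, hs]
  decide

-- "was the last kept line blank?" as A's loop reads it
def pvLb (acc : List String) : Bool :=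
  match PySem.List.pyGet? acc (-1) with
  | some p => pvBlank p
  | none => false

theorem pvLb_append (acc : List String) (l : String) : pvLb (acc ++ [l]) = pvBlank l := by
  simp [pvLb, PySem.List.pyGet?, PySem.List.pyIdx?]

-- reference one-pass: state = (in_code_block, last-kept-line-blank flag)
def pvRef : List String → Bool → Bool → List String
  | [], _, _ => []
  | l :: ls, inCode, lb =>
    if pvFence l then l :: pvRef ls (!inCode) false
    else if inCode then l :: pvRef ls true (pvBlank l)
    else if pvBlank l then (if lb then pvRef ls false true else l :: pvRef ls false true)
    else l :: pvRef ls false false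

-- A's fold equals the reference pass
theorem pvA_ref (ls : List String) : ∀ (acc : List String) (inCode : Bool),
    (ls.foldl pvAStep (acc, inCode)).1 = acc ++ pvRef ls inCode (pvLb acc) := by
  induction ls with
  | nil => intro acc inCode; simp [pvRef]
  | cons l ls ih =>
    intro acc inCode
    by_cases hf : pvFence l = true
    · have hb : pvBlank l = false := by
        by_cases hbl : pvBlank l = true
        · exact absurd hf (by simp [pvFence_not_blank l hbl])
        · simpa using hbl
      have hstep : pvAStep (acc, inCode) l = (acc ++ [l], !inCode) := by
        simp [pvAStep, hf]
      rw [List.foldl_cons, hstep, ih (acc ++ [l]) (!inCode), pvLb_append, hb]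
      simp [pvRef, hf]
    · cases inCode with
      | true =>
        have hstep : pvAStep (acc, true) l = (acc ++ [l], true) := by
          simp [pvAStep, hf]
        rw [List.foldl_cons, hstep, ih (acc ++ [l]) true, pvLb_append]
        simp [pvRef, hf]
      | false =>
        by_cases hb : pvBlank l = true
        · cases hlb : pvLb acc with
          | true =>
            have hstep : pvAStep (acc, false) l = (acc, false) := by
              unfold pvAStep pvLb at *
              cases hg : PySem.List.pyGet? acc (-1) with
              | none => rw [hg] at hlb; simp at hlb
              | some p => rw [hg] at hlb; simp [hf, hb, hlb]
            rw [List.foldl_cons, hstep, ih acc false, hlb]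
            simp [pvRef, hf, hb]
          | false =>
            have hstep : pvAStep (acc, false) l = (acc ++ [l], false) := by
              unfold pvAStep pvLb at *
              cases hg : PySem.List.pyGet? acc (-1) with
              | none => simp [hf, hb]
              | some p => rw [hg] at hlb; simp [hf, hb, hlb]
            rw [List.foldl_cons, hstep, ih (acc ++ [l]) false, pvLb_append, hb]
            simp [pvRef, hf, hb]
        · have hb' : pvBlank l = false := by simpa using hb
          have hstep : pvAStep (acc, false) l = (acc ++ [l], false) := by
            simp [pvAStep, hf, hb']
          rw [List.foldl_cons, hstep, ih (acc ++ [l]) false, pvLb_append, hb']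
          simp [pvRef, hf, hb']

-- the code phase of the reference pass is pvTakeCode
theorem pvRef_code (ls : List String) : ∀ (lb : Bool),
    pvRef ls true lb = (pvTakeCode ls).1 ++ pvRef (pvTakeCode ls).2 false false := by
  induction ls with
  | nil => intro lb; simp [pvRef, pvTakeCode]
  | cons l ls ih =>
    intro lb
    by_cases hf : pvFence l = true
    · simp [pvRef, pvTakeCode, hf]
    · simp [pvRef, pvTakeCode, hf, ih (pvBlank l)]

-- blank-run collapse with a "previous was blank" flag
def pvCcol : Bool → List String → List String
  | _, [] => []
  | lb, l :: ls =>
    if pvBlank l then (if lb then pvCcol true ls else l :: pvCcol true ls)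
    else l :: pvCcol false ls

-- the text phase of the reference pass is pvTakeText + pvCcol
theorem pvRef_text (ls : List String) : ∀ (lb : Bool),
    pvRef ls false lb = pvCcol lb (pvTakeText ls).1 ++ pvRef (pvTakeText ls).2 false false := by
  induction ls with
  | nil => intro lb; simp [pvRef, pvTakeText, pvCcol]
  | cons l ls ih =>
    intro lb
    by_cases hf : pvFence l = true
    · simp [pvRef, pvTakeText, pvCcol, hf]
    · by_cases hb : pvBlank l = true
      · cases lb with
        | true => simp [pvRef, pvTakeText, pvCcol, hf, hb, ih true]
        | false => simp [pvRef, pvTakeText, pvCcol, hf, hb, ih true]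
      · simp [pvRef, pvTakeText, pvCcol, hf, hb, ih false]

theorem pvCcol_true (ls : List String) : pvCcol true ls = pvCcol false (ls.dropWhile pvBlank) := by
  induction ls with
  | nil => simp [pvCcol]
  | cons l ls ih =>
    by_cases hb : pvBlank l = true
    · simp [pvCcol, hb, ih]
    · simp [pvCcol, hb]

-- B's collapse is pvCcol with an initially non-blank flag
theorem pvCollapse_eq_ccol (ls : List String) : pvCollapse ls = pvCcol false ls := by
  fun_induction pvCollapse ls with
  | case1 => simp [pvCcol]
  | case2 l ls hb ih => simp [pvCcol, hb, ih, ← pvCcol_true]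
  | case3 l ls hb ih => simp [pvCcol, hb, ih]

-- B's segment concatenation equals the reference pass
set_option maxHeartbeats 1000000 in
theorem pvSegFlat (ls : List String) :
    (pvSegments ls).flatMap (fun s => if s.1 then s.2 else pvCollapse s.2) =
      pvRef ls false false := by
  cases ls with
  | nil => simp [pvSegments, pvRef]
  | cons l ls =>
    by_cases hf : pvFence l = true
    · have hseg : pvSegments (l :: ls) =
          (true, l :: (pvTakeCode ls).1) :: pvSegments (pvTakeCode ls).2 := by
        simp [pvSegments, hf]
      rw [hseg, List.flatMap_cons, pvSegFlat (pvTakeCode ls).2]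
      simp [pvRef, hf, pvRef_code ls false]
    · have hseg : pvSegments (l :: ls) =
          (false, l :: (pvTakeText ls).1) :: pvSegments (pvTakeText ls).2 := by
        simp [pvSegments, hf]
      have ht : pvTakeText (l :: ls) = (l :: (pvTakeText ls).1, (pvTakeText ls).2) := by
        simp [pvTakeText, hf]
      rw [hseg, List.flatMap_cons, pvSegFlat (pvTakeText ls).2, pvCollapse_eq_ccol]
      have := pvRef_text (l :: ls) false
      rw [ht] at this
      exact this.symm
termination_by ls.length
decreasing_by
  all_goals first
  | (have := pvTakeCode_len ls; simpa using Nat.lt_succ_of_le this)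
  | (have := pvTakeText_len ls; simpa using Nat.lt_succ_of_le this)

-- ===== VERDICT (by name: the statement is the Claim_ definition above) =====
theorem preserve_structure_intelligent_py_spec : Claim_equal_preserve_structure_intelligent_py := by
  intro text _
  unfold Spec_preserve_structure_intelligent_py preserve_structure_intelligent_py
    preserve_structure_intelligent_py_alt
  have hlb : pvLb ([] : List String) = false := by
    simp [pvLb, PySem.List.pyGet?, PySem.List.pyIdx?]
  rw [pvA_ref ((PySem.Str.split? text "\n").getD []) [] false, hlb,
    PySem.List.foldl_append_eq_flatMap,
    pvSegFlat ((PySem.Str.split? text "\n").getD [])]
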